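-- pv_equiv track=rewrite | github.com/RadetzkyLi/TrajYOLO-SSD | preprocessing/data_cleaning.py | merge_index
-- ===== SOURCE A (Python) =====
-- def merge_index(index_list):
--     '''
--     Merge neighboring index pairs where difference of first value of latter
--     and second value of former is no larger than 1.
--     :param index_list : one dim list of ascending order with dual length;
--     :return : a list after merging.
--     '''
--     index_list_new = []
--     inx_srt = index_list[0]
--     inx_end = index_list[1]
--     for i in range(2,len(index_list) - 1,2):
--         if index_list[i] - inx_end <= 1:
--             inx_end = index_list[i+1]
--             continue
--         index_list_new.append(inx_srt)
--         index_list_new.append(inx_end)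
--         inx_srt = index_list[i]
--         inx_end = index_list[i+1]
--     if not index_list_new or inx_srt > index_list_new[-1]:
--         index_list_new.append(inx_srt)
--         index_list_new.append(inx_end)
--     return index_list_new
-- ===== SOURCE B (Python) =====
-- def merge_index(index_list):
--     # Group the (start, end) index pairs into runs of mergeable neighbours and
--     # emit each run's first start and last end.
--     pairs = [(index_list[i], index_list[i + 1]) for i in range(0, len(index_list) - 1, 2)]
--     merged = []
--     n = len(pairs)
--     k = 0
--     while k < n:
--         s, e = pairs[k]
--         j = k + 1
--         while j < n and pairs[j][0] - e <= 1:
--             e = pairs[j][1]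
--             j += 1
--         merged.append(s)
--         merged.append(e)
--         k = j
--     return merged
-- ===== Notes on version B (the rewrite author's own statement) =====
-- stated objective: alternative
-- what changed: B first builds the explicit list of (start,end) index pairs, then scans it grouping consecutive mergeable pairs into runs and emits each run's first start and last end, replacing A's scalar-state fold with its always-true trailing flush guard.
import Mathlib
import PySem

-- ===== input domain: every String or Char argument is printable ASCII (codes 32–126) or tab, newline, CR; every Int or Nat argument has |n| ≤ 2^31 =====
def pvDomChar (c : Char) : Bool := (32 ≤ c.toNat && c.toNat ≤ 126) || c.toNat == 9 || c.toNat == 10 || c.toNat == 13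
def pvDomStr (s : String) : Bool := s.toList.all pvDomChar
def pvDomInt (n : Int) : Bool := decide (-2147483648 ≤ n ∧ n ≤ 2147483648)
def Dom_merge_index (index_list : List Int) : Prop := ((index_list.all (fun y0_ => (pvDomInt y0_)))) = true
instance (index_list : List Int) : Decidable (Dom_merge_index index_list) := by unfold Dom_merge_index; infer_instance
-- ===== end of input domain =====

-- B re-decomposes A's scalar-state fold as: build the (start,end) pair list, then emit one
-- (first start, last end) per run of mergeable neighbours — no trailing conditional flush.

-- ===== PORT A =====
-- the loop body of A's for-loop: state = (index_list_new, inx_srt, inx_end)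
def mergeStep (index_list : List Int) (acc : List Int × Int × Int) (i : Int) : List Int × Int × Int :=
  if PySem.List.pyGetD index_list i 0 - acc.2.2 ≤ 1 then
    (acc.1, acc.2.1, PySem.List.pyGetD index_list (i + 1) 0)
  else
    (acc.1 ++ [acc.2.1, acc.2.2], PySem.List.pyGetD index_list i 0, PySem.List.pyGetD index_list (i + 1) 0)

-- the trailing 'if not index_list_new or inx_srt > index_list_new[-1]' flush
def mergeFinish (st : List Int × Int × Int) : List Int :=
  if st.1 = [] ∨ (PySem.List.pyGet? st.1 (-1)).getD 0 < st.2.1 then st.1 ++ [st.2.1, st.2.2] else st.1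

def merge_index (index_list : List Int) : List Int :=
  match PySem.List.pyGet? index_list 0, PySem.List.pyGet? index_list 1 with
  | some s0, some e0 =>
      mergeFinish ((PySem.List.pyRange 2 ((index_list.length : Int) - 1) 2).foldl
        (mergeStep index_list) ([], s0, e0))
  | _, _ => []  -- IndexError in Python (len < 2); excluded by Pre_

-- ===== PORT B =====
-- pairs = [(index_list[i], index_list[i+1]) for i in range(0, len(index_list)-1, 2)]
def readPair (index_list : List Int) (i : Int) : Int × Int :=
  (PySem.List.pyGetD index_list i 0, PySem.List.pyGetD index_list (i + 1) 0)

def pairsOf (index_list : List Int) : List (Int × Int) :=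
  (PySem.List.pyRange 0 ((index_list.length : Int) - 1) 2).map (readPair index_list)

-- the nested while loops: inner while absorbs mergeable neighbours into (s, e),
-- outer while emits the run and moves to the next pair
def emitRuns : Int → Int → List (Int × Int) → List Int
  | s, e, [] => [s, e]
  | s, e, (s', e') :: rest =>
      if s' - e ≤ 1 then emitRuns s e' rest else s :: e :: emitRuns s' e' rest

def merge_index_alt (index_list : List Int) : List Int :=
  match pairsOf index_list with
  | [] => []
  | (s, e) :: rest => emitRuns s e rest

-- ===== PRECONDITION & SPEC =====
-- Pre_ excludes exactly the inputs (fewer than two elements) on which A raises IndexError.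
def Pre_merge_index (index_list : List Int) : Prop := 2 ≤ index_list.length
instance (index_list : List Int) : Decidable (Pre_merge_index index_list) := by
  unfold Pre_merge_index; infer_instance

def pvWitness_merge_index : List Int := [0, 1, 5, 6]

def Spec_merge_index (index_list : List Int) (out : List Int) : Prop := out = merge_index_alt index_list
instance (index_list : List Int) (out : List Int) : Decidable (Spec_merge_index index_list out) := by
  unfold Spec_merge_index; infer_instance

-- ===== CLAIM (what is proved, stated in full; the proofs are below) =====
def Claim_equal_merge_index : Prop := ∀ (index_list : List Int), Dom_merge_index index_list → Pre_merge_index index_list → Spec_merge_index index_list (merge_index index_list)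

-- ===== LEMMAS AND PROOFS =====

-- A's loop body, seen as a function of the pair of values it reads
def stepP (acc : List Int × Int × Int) (p : Int × Int) : List Int × Int × Int :=
  if p.1 - acc.2.2 ≤ 1 then (acc.1, acc.2.1, p.2)
  else (acc.1 ++ [acc.2.1, acc.2.2], p.1, p.2)

lemma mergeStep_eq (il : List Int) :
    mergeStep il = fun acc i => stepP acc (readPair il i) := rfl

lemma pyRange_two_cons (a b : Int) (h : a < b) :
    PySem.List.pyRange a b 2 = a :: PySem.List.pyRange (a + 2) b 2 := by
  rw [PySem.List.pyRange_of_pos a b (by norm_num), PySem.List.pyRange_of_pos (a + 2) b (by norm_num)]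
  have hn : (if a < b then ((b - a + 2 - 1) / 2).toNat else 0)
      = (if a + 2 < b then ((b - (a + 2) + 2 - 1) / 2).toNat else 0) + 1 := by
    split_ifs <;> omega
  rw [hn, List.range_succ_eq_map, List.map_cons, List.map_map]
  refine congrArg₂ _ (by simp) (List.map_congr_left ?_)
  intro k _
  simp [Function.comp, Nat.succ_eq_add_one]
  ring

-- the loop invariant: whatever was emitted so far ends strictly below the pending start,
-- so A's trailing flush condition always fires
lemma loop_eq (ps : List (Int × Int)) : ∀ (acc : List Int) (s e : Int),
    (acc = [] ∨ (PySem.List.pyGet? acc (-1)).getD 0 < s) →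
    mergeFinish (ps.foldl stepP (acc, s, e)) = acc ++ emitRuns s e ps := by
  induction ps with
  | nil =>
      intro acc s e hinv
      simp only [List.foldl_nil, mergeFinish, emitRuns]
      rw [if_pos hinv]
  | cons p rest ih =>
      intro acc s e hinv
      obtain ⟨s', e'⟩ := p
      simp only [List.foldl_cons, stepP, emitRuns]
      by_cases hle : s' - e ≤ 1
      · rw [if_pos hle, if_pos hle]
        exact ih acc s e' hinv
      · rw [if_neg hle, if_neg hle]
        have hlast : PySem.List.pyGet? (acc ++ [s, e]) (-1) = some e := by
          have : acc ++ [s, e] = (acc ++ [s]) ++ [e] := by simp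
          rw [this, PySem.List.pyGet?_neg_one_append_singleton]
        have := ih (acc ++ [s, e]) s' e' (Or.inr (by rw [hlast]; simpa using by omega))
        simpa [List.append_assoc] using this

-- ===== VERDICT (by name: the statement is the Claim_ definition above) =====
theorem merge_index_spec : Claim_equal_merge_index := by
  intro il _ hpre
  unfold Pre_merge_index at hpre
  unfold Spec_merge_index
  match il, hpre with
  | a :: b :: t, _ =>
    have h0 : PySem.List.pyGet? (a :: b :: t) 0 = some a := by
      simp [PySem.List.pyGet?_zero_cons]
    have h1 : PySem.List.pyGet? (a :: b :: t) 1 = some b := by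
      rw [(by norm_num : (1 : Int) = ((1 : Nat) : Int)), PySem.List.pyGet?_natCast]
      rfl
    have hlen : ((a :: b :: t).length : Int) - 1 = (t.length : Int) + 1 := by
      simp
    have hcons : PySem.List.pyRange 0 (((a :: b :: t).length : Int) - 1) 2
        = 0 :: PySem.List.pyRange 2 (((a :: b :: t).length : Int) - 1) 2 := by
      rw [pyRange_two_cons 0 _ (by rw [hlen]; omega)]
      norm_num
    have hrp : readPair (a :: b :: t) 0 = (a, b) := by
      unfold readPair
      rw [(by norm_num : (0 : Int) + 1 = ((1 : Nat) : Int)), PySem.List.pyGetD_natCast]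
      rw [PySem.List.pyGetD_zero_cons]
      rfl
    unfold merge_index merge_index_alt pairsOf
    rw [h0, h1, hcons, List.map_cons, hrp]
    show mergeFinish (List.foldl (mergeStep (a :: b :: t)) ([], a, b)
          (PySem.List.pyRange 2 (((a :: b :: t).length : Int) - 1) 2))
        = emitRuns a b (List.map (readPair (a :: b :: t))
          (PySem.List.pyRange 2 (((a :: b :: t).length : Int) - 1) 2))
    rw [mergeStep_eq, ← List.foldl_map (f := readPair (a :: b :: t))]
    exact loop_eq _ [] a b (Or.inl rfl)
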